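-- pv_equiv track=rewrite | github.com/MrBrantCode/unitest_baseline | mut_generate/mist_train_taco/taco_13938/solution.py | count_ordered_pairs
-- ===== SOURCE A (Python) =====
-- def count_ordered_pairs(S: str) -> int:
--     # Dictionary to store the frequency of each character
--     char_count = {}
--
--     # Count the frequency of each character in the string
--     for char in S:
--         if char in char_count:
--             char_count[char] += 1
--         else:
--             char_count[char] = 1
--
--     # Calculate the number of ordered pairs for each character
--     total_pairs = 0
--     for count in char_count.values():
--         total_pairs += count * count
--
--     return total_pairs
-- ===== SOURCE B (Python) =====
-- def count_ordered_pairs(S: str) -> int: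
--     # Sort the characters so equal ones are adjacent, then scan maximal runs
--     # and add the square of each run length.
--     total = 0
--     run = 0
--     prev = None
--     for ch in sorted(S):
--         if ch == prev:
--             run += 1
--         else:
--             total += run * run
--             run = 1
--             prev = ch
--     return total + run * run
-- ===== Notes on version B (the rewrite author's own statement) =====
-- stated objective: alternative
-- what changed: Replaced the frequency dictionary with a sort followed by a single run-length scan over the sorted characters, squaring each maximal run length.
import Mathlib
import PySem

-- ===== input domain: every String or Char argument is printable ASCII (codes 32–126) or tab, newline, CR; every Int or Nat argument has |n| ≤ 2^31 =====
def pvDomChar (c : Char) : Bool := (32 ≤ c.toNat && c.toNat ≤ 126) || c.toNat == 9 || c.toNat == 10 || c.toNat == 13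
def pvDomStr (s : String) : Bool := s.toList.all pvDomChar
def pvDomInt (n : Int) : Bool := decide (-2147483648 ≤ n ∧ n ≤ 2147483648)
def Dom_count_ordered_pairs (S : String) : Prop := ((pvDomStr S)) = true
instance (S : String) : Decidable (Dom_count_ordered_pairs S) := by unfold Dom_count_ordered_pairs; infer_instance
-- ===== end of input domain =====

-- B replaces A's frequency dictionary by a sort plus one run-length scan (alternative algorithm, same results).

-- ===== PORT A =====
def count_ordered_pairs (S : String) : Int :=
  let char_count : PySem.Dict Char Int :=
    S.toList.foldl (fun d char =>
      if d.contains char then d.insert char (d.getD char 0 + 1) else d.insert char 1)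
      PySem.Dict.empty
  char_count.values.foldl (fun total_pairs c => total_pairs + c * c) 0

-- ===== PORT B =====
-- one iteration of B's for-loop over sorted(S): state = (prev, run, total)
def pvRunStep (st : Option Char × Int × Int) (ch : Char) : Option Char × Int × Int :=
  if st.1 = some ch then (st.1, st.2.1 + 1, st.2.2)
  else (some ch, 1, st.2.2 + st.2.1 * st.2.1)

def count_ordered_pairs_alt (S : String) : Int :=
  let st := (PySem.List.sorted S.toList (fun c => c) false).foldl pvRunStep (none, 0, 0)
  st.2.2 + st.2.1 * st.2.1

-- ===== PRECONDITION & SPEC =====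
def Spec_count_ordered_pairs (S : String) (out : Int) : Prop := out = count_ordered_pairs_alt S
instance (S : String) (out : Int) : Decidable (Spec_count_ordered_pairs S out) := by unfold Spec_count_ordered_pairs; infer_instance

-- ===== CLAIM (what is proved, stated in full; the proofs are below) =====
def Claim_equal_count_ordered_pairs : Prop := ∀ (S : String), Dom_count_ordered_pairs S → Spec_count_ordered_pairs S (count_ordered_pairs S)

-- ===== LEMMAS AND PROOFS =====

-- canonical value both programs compute: sum over the distinct characters of the square of the multiplicity
def pvG (l : List Char) : Int := ∑ k ∈ l.toFinset, (l.count k : Int) * (l.count k)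

def pvFinish (st : Option Char × Int × Int) : Int := st.2.2 + st.2.1 * st.2.1

theorem pvG_perm {l l' : List Char} (h : l.Perm l') : pvG l = pvG l' := by
  unfold pvG
  rw [List.toFinset_eq_of_perm l l' h]
  exact Finset.sum_congr rfl (fun k _ => by rw [List.Perm.count h k])

-- splitting off the group of one character (holds for any list)
theorem pvG_split (y : Char) (ys : List Char) :
    pvG (y :: ys) = (((y :: ys).count y : Int)) * ((y :: ys).count y)
      + pvG (ys.filter (fun z => z ≠ y)) := by
  unfold pvG
  rw [← Finset.add_sum_erase _ _ (by simp : y ∈ (y :: ys).toFinset)]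
  congr 1
  have hfin : (ys.filter (fun z => z ≠ y)).toFinset = ((y :: ys).toFinset).erase y := by
    ext x
    by_cases hx : x = y <;> simp [hx, List.mem_toFinset]
  rw [hfin]
  refine Finset.sum_congr rfl (fun k hk => ?_)
  have hk' : k ≠ y := (Finset.mem_erase.mp hk).1
  have : (ys.filter (fun z => z ≠ y)).count k = (y :: ys).count k := by
    rw [List.count_filter (by simp [hk'])]
    simp [Ne.symm hk']
  rw [this]

-- A's loop body is the Counter step
theorem pvStepEq (d : PySem.Dict Char Int) (c : Char) :
    (if d.contains c then d.insert c (d.getD c 0 + 1) else d.insert c 1)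
      = d.modify c 0 (· + 1) := by
  by_cases h : d.contains c = true
  · simp [h, PySem.Dict.modify]
  · simp only [Bool.not_eq_true] at h
    simp [h, PySem.Dict.modify, PySem.Dict.getD_of_not_contains d 0 h]

theorem pvDedup_toFinset (l : List Char) : (PySem.List.dedup l).toFinset = l.toFinset := by
  ext x
  simp [List.mem_toFinset]

theorem pvA_eq_G (S : String) : count_ordered_pairs S = pvG S.toList := by
  unfold count_ordered_pairs
  have hd : (S.toList.foldl (fun d char =>
      if d.contains char then d.insert char (d.getD char 0 + 1) else d.insert char 1)
      PySem.Dict.empty) = PySem.Dict.counter S.toList := by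
    rw [PySem.Dict.counter_eq_foldl]
    congr 1
    funext d c
    exact pvStepEq d c
  have hv : (PySem.Dict.counter S.toList).values
      = (PySem.Set.ofList S.toList).map (fun k => (S.toList.count k : Int)) := by
    show ((PySem.Dict.counter S.toList).items).map (·.2) = _
    rw [PySem.Dict.items_counter, List.map_map]
    rfl
  rw [hd, PySem.List.foldl_add, hv, List.map_map, ← PySem.List.dedup_eq_ofList]
  rw [← List.sum_toFinset _ (PySem.List.nodup_dedup S.toList), pvDedup_toFinset]
  simp [pvG]

-- the run-length scan over a sorted suffix, with current character a, run length r, accumulated total t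
theorem pvMain (ys : List Char) : ∀ (a : Char) (r t : Int),
    (∀ y ∈ ys, a ≤ y) → ys.Pairwise (· ≤ ·) →
    pvFinish (ys.foldl pvRunStep (some a, r, t))
      = t + (r + (ys.count a : Int)) * (r + (ys.count a : Int))
        + pvG (ys.filter (fun z => z ≠ a)) := by
  induction ys with
  | nil => intro a r t _ _; simp [pvFinish, pvG]
  | cons y ys ih =>
    intro a r t hle hp
    rw [List.foldl_cons]
    by_cases hy : y = a
    · subst hy
      have hstep : pvRunStep (some y, r, t) y = (some y, r + 1, t) := by
        simp [pvRunStep]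
      rw [hstep, ih y (r+1) t (fun z hz => (List.pairwise_cons.mp hp).1 z hz)
        (List.pairwise_cons.mp hp).2]
      have : ((y :: ys).count y : Int) = (ys.count y : Int) + 1 := by simp
      rw [List.filter_cons_of_neg (by simp)]
      rw [this]; ring_nf
    · have hstep : pvRunStep (some a, r, t) y = (some y, 1, t + r * r) := by
        simp [pvRunStep, Ne.symm hy]
      have hya : a < y := lt_of_le_of_ne (hle y (by simp)) (Ne.symm hy)
      have hnotin : ∀ z ∈ y :: ys, z ≠ a := by
        intro z hz
        rcases List.mem_cons.mp hz with h | h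
        · exact h ▸ hy
        · exact fun hza => absurd (hza ▸ (List.pairwise_cons.mp hp).1 z h)
            (not_le.mpr hya)
      have hcount : (y :: ys).count a = 0 := by
        rw [List.count_eq_zero]
        intro hmem; exact hnotin a hmem rfl
      rw [hstep, ih y 1 (t + r * r) (fun z hz => (List.pairwise_cons.mp hp).1 z hz)
        (List.pairwise_cons.mp hp).2]
      have hfil : List.filter (fun z => decide (z ≠ a)) (y :: ys) = y :: ys :=
        List.filter_eq_self.mpr (fun z hz => by simpa using hnotin z hz)
      have : ((y :: ys).count y : Int) = (ys.count y : Int) + 1 := by simp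
      rw [hfil, pvG_split y ys, hcount, this]
      push_cast; ring_nf

theorem pvB_eq_G (S : String) : count_ordered_pairs_alt S = pvG S.toList := by
  unfold count_ordered_pairs_alt
  have hperm := PySem.List.sorted_perm S.toList (fun c => c) false
  rw [← pvG_perm hperm]
  have hpw : (PySem.List.sorted S.toList (fun c => c) false).Pairwise (· ≤ ·) := by
    simpa using PySem.List.sorted_pairwise S.toList (fun c => c)
  cases hs : PySem.List.sorted S.toList (fun c => c) false with
  | nil => simp [pvG]
  | cons y tl =>
    rw [hs] at hpw
    have hstep : pvRunStep (none, 0, 0) y = (some y, 1, 0) := by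
      simp [pvRunStep]
    show pvFinish (List.foldl pvRunStep (none,0,0) (y :: tl)) = pvG (y :: tl)
    rw [List.foldl_cons, hstep,
      pvMain tl y 1 0 (fun z hz => (List.pairwise_cons.mp hpw).1 z hz)
        (List.pairwise_cons.mp hpw).2]
    rw [pvG_split y tl]
    have : ((y :: tl).count y : Int) = (tl.count y : Int) + 1 := by simp
    rw [this]; ring_nf

-- ===== VERDICT (by name: the statement is the Claim_ definition above) =====
theorem count_ordered_pairs_spec : Claim_equal_count_ordered_pairs := by
  intro S _
  unfold Spec_count_ordered_pairs
  rw [pvA_eq_G, pvB_eq_G]
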